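-- pv_equiv track=rewrite | github.com/dojorio/dojo-centro | 2014/20140716 - Doces - python/doces.py | menor_diferenca
-- ===== SOURCE A (Python) =====
-- def menor_diferenca(doces, n_criancas = 2):
--     doces.sort()
--     criancas = [0] * n_criancas
--
--     for doce in doces[::-1]:
--         crianca = crianca_menos_doces(criancas)
--         criancas[crianca] += doce
--
--     if n_criancas == 3:
--         return min(abs(criancas[0] - criancas[1]),
--                    abs(criancas[1] - criancas[2]),
--                    abs(criancas[0] - criancas[2]))
--     else:
--         return abs(criancas[0] - criancas[1])
--
-- def crianca_menos_doces(criancas):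
--     return criancas.index(min(criancas))
-- ===== SOURCE B (Python) =====
-- def menor_diferenca(doces, n_criancas = 2):
--     doces.sort()
--     # worklist kept sorted ascending by (total, child_index): head = poorest child,
--     # lowest index first on ties -- same choice as rescanning with index(min(...))
--     fila = [(0, i) for i in range(n_criancas)]
--     for doce in reversed(doces):
--         total, idx = fila.pop(0)
--         novo = (total + doce, idx)
--         j = 0
--         while j < len(fila) and fila[j] < novo:
--             j += 1
--         fila.insert(j, novo)
--     totais = [0] * n_criancas
--     for total, idx in fila:
--         totais[idx] = total
--     if n_criancas == 3:
--         return min(abs(totais[0] - totais[1]),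
--                    abs(totais[1] - totais[2]),
--                    abs(totais[0] - totais[2]))
--     else:
--         return abs(totais[0] - totais[1])
-- ===== Notes on version B (the rewrite author's own statement) =====
-- stated objective: alternative
-- what changed: Replaces the per-candy argmin rescan over a totals array (min + list.index) with a priority worklist of (total, child_index) pairs kept sorted ascending: pop the head (poorest child, lowest index on ties), reinsert with the candy added, then scatter the pairs back into a per-index totals array.
import Mathlib
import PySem

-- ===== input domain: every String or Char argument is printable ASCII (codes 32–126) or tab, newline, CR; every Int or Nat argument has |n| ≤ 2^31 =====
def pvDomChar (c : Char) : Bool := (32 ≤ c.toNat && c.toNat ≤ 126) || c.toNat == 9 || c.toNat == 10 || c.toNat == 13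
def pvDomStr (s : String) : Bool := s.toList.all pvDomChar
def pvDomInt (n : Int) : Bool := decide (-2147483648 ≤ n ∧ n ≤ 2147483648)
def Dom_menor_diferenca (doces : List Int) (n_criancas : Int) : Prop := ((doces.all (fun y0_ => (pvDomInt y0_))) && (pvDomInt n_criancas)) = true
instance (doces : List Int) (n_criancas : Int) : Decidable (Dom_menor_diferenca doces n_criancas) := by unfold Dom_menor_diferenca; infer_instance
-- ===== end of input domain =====

-- B replaces A's per-candy argmin rescan (min + list.index over a totals array) with a
-- priority worklist of (total, child_index) pairs kept sorted ascending, popped and reinserted;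
-- equivalence is about the RETURN value (both A and B sort `doces` in place the same way).

-- ===== PORT A =====
-- criancas.index(min(criancas)); getD-defaults are never reached when criancas ≠ []
def crianca_menos_doces (criancas : List Int) : Nat :=
  (PySem.List.index? criancas ((PySem.List.min? criancas (fun x => x)).getD 0)).getD 0

-- criancas[crianca] += doce (crianca is a valid index returned by list.index)
def passoA (criancas : List Int) (doce : Int) : List Int :=
  let crianca := crianca_menos_doces criancas
  criancas.set crianca (criancas.getD crianca 0 + doce)

def menor_diferenca (doces : List Int) (n_criancas : Int) : Int :=
  let doces := PySem.List.sorted doces (fun x => x) false   -- doces.sort()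
  let criancas : List Int := List.replicate n_criancas.toNat 0   -- [0] * n_criancas
  let criancas := doces.reverse.foldl passoA criancas       -- for doce in doces[::-1] (slice?_none_none_neg_one)
  if n_criancas = 3 then
    min (min |criancas.getD 0 0 - criancas.getD 1 0|
             |criancas.getD 1 0 - criancas.getD 2 0|)
        |criancas.getD 0 0 - criancas.getD 2 0|
  else
    |criancas.getD 0 0 - criancas.getD 1 0|

-- ===== PORT B =====
-- the `while j ... fila.insert(j, novo)` scan: insert keeping the list sorted by (total, idx)
-- (tail-recursive: `acc` is the already-scanned prefix, reversed)
def mdInsertAux (novo : Int × Nat) (acc : List (Int × Nat)) : List (Int × Nat) → List (Int × Nat)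
  | [] => acc.reverse ++ [novo]
  | x :: resto =>
      if x.1 < novo.1 ∨ (x.1 = novo.1 ∧ x.2 < novo.2) then mdInsertAux novo (x :: acc) resto
      else acc.reverse ++ novo :: x :: resto

def mdInsert (novo : Int × Nat) (fila : List (Int × Nat)) : List (Int × Nat) :=
  mdInsertAux novo [] fila

-- pop the head (poorest child, lowest index on ties) and reinsert with the candy added;
-- the [] branch is Python's IndexError on fila.pop(0), unreachable under Pre_
def passoB (fila : List (Int × Nat)) (doce : Int) : List (Int × Nat) :=
  match fila with
  | [] => []
  | e :: resto => mdInsert (e.1 + doce, e.2) resto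

def menor_diferenca_alt (doces : List Int) (n_criancas : Int) : Int :=
  let doces := PySem.List.sorted doces (fun x => x) false   -- doces.sort()
  let fila : List (Int × Nat) := (List.range n_criancas.toNat).map (fun i => ((0 : Int), i))
  let fila := doces.reverse.foldl passoB fila               -- for doce in reversed(doces)
  -- totais = [0] * n_criancas; totais[idx] = total  (a Python list is a mutable array)
  let totais := fila.foldl (fun ts e => ts.setIfInBounds e.2 e.1)
    (Array.replicate n_criancas.toNat (0 : Int))
  if n_criancas = 3 then
    min (min |totais.getD 0 0 - totais.getD 1 0|
             |totais.getD 1 0 - totais.getD 2 0|)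
        |totais.getD 0 0 - totais.getD 2 0|
  else
    |totais.getD 0 0 - totais.getD 1 0|

-- ===== PRECONDITION & SPEC =====
-- A raises for n_criancas < 2 (IndexError or ValueError: it reads the second child's total,
-- or takes min of an empty child list); those inputs are excluded. For n_criancas ≥ 2 A always returns.
def Pre_menor_diferenca (doces : List Int) (n_criancas : Int) : Prop := 2 ≤ n_criancas
instance (doces : List Int) (n_criancas : Int) : Decidable (Pre_menor_diferenca doces n_criancas) := by
  unfold Pre_menor_diferenca; infer_instance

def pvWitness_menor_diferenca : List Int × Int := ([3, 1, 2, 2], 3)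

def Spec_menor_diferenca (doces : List Int) (n_criancas : Int) (out : Int) : Prop := out = menor_diferenca_alt doces n_criancas
instance (doces : List Int) (n_criancas : Int) (out : Int) : Decidable (Spec_menor_diferenca doces n_criancas out) := by unfold Spec_menor_diferenca; infer_instance

-- ===== CLAIM (what is proved, stated in full; the proofs are below) =====
def Claim_equal_menor_diferenca : Prop := ∀ (doces : List Int) (n_criancas : Int), Dom_menor_diferenca doces n_criancas → Pre_menor_diferenca doces n_criancas → Spec_menor_diferenca doces n_criancas (menor_diferenca doces n_criancas)

-- ===== LEMMAS AND PROOFS =====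

-- strict lexicographic order on (total, child index) — B's worklist order
def lexlt (p q : Int × Nat) : Prop := p.1 < q.1 ∨ (p.1 = q.1 ∧ p.2 < q.2)

theorem lexlt_trans {p q r : Int × Nat} (h1 : lexlt p q) (h2 : lexlt q r) : lexlt p r := by
  unfold lexlt at *; rcases h1 with h1 | ⟨h1, h1'⟩ <;> rcases h2 with h2 | ⟨h2, h2'⟩
  · exact Or.inl (h1.trans h2)
  · exact Or.inl (h2 ▸ h1)
  · exact Or.inl (h1 ▸ h2)
  · exact Or.inr ⟨h1.trans h2, h1'.trans h2'⟩

theorem lexlt_of_not {p q : Int × Nat} (hne : p ≠ q) (h : ¬ lexlt p q) : lexlt q p := by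
  unfold lexlt at *
  rcases lt_trichotomy p.1 q.1 with h1 | h1 | h1
  · exact absurd (Or.inl h1) h
  · rcases lt_trichotomy p.2 q.2 with h2 | h2 | h2
    · exact absurd (Or.inr ⟨h1, h2⟩) h
    · exact absurd (Prod.ext h1 h2) hne
    · exact Or.inr ⟨h1.symm, h2⟩
  · exact Or.inl h1

theorem mdInsertAux_acc (novo : Int × Nat) :
    ∀ (l : List (Int × Nat)) (acc : List (Int × Nat)),
      mdInsertAux novo acc l = acc.reverse ++ mdInsertAux novo [] l
  | [], acc => by simp [mdInsertAux]
  | x :: resto, acc => by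
      by_cases hc : x.1 < novo.1 ∨ (x.1 = novo.1 ∧ x.2 < novo.2)
      · simp only [mdInsertAux, if_pos hc]
        rw [mdInsertAux_acc novo resto (x :: acc), mdInsertAux_acc novo resto [x]]
        simp
      · simp [mdInsertAux, if_neg hc]

theorem mdInsert_nil (novo : Int × Nat) : mdInsert novo [] = [novo] := rfl

theorem mdInsert_cons (novo x : Int × Nat) (resto : List (Int × Nat)) :
    mdInsert novo (x :: resto) =
      if x.1 < novo.1 ∨ (x.1 = novo.1 ∧ x.2 < novo.2) then x :: mdInsert novo resto
      else novo :: x :: resto := by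
  by_cases hc : x.1 < novo.1 ∨ (x.1 = novo.1 ∧ x.2 < novo.2)
  · rw [if_pos hc]
    unfold mdInsert
    simp only [mdInsertAux, if_pos hc]
    rw [mdInsertAux_acc novo resto [x]]
    simp
  · rw [if_neg hc]
    unfold mdInsert
    simp [mdInsertAux, if_neg hc]

theorem mem_mdInsert {y e : Int × Nat} : ∀ {l : List (Int × Nat)}, y ∈ mdInsert e l → y = e ∨ y ∈ l
  | [], h => by simpa [mdInsert_nil] using h
  | x :: xs, h => by
      by_cases hc : x.1 < e.1 ∨ (x.1 = e.1 ∧ x.2 < e.2)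
      · rw [mdInsert_cons, if_pos hc] at h
        simp only [List.mem_cons] at h
        rcases h with h | h
        · exact Or.inr (h ▸ List.mem_cons_self)
        · rcases mem_mdInsert h with h' | h'
          · exact Or.inl h'
          · exact Or.inr (List.mem_cons_of_mem _ h')
      · rw [mdInsert_cons, if_neg hc] at h
        simp only [List.mem_cons] at h
        rcases h with h | h | h
        · exact Or.inl h
        · exact Or.inr (h ▸ List.mem_cons_self)
        · exact Or.inr (List.mem_cons_of_mem _ h)

theorem mdInsert_perm (e : Int × Nat) : ∀ (l : List (Int × Nat)), (mdInsert e l).Perm (e :: l)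
  | [] => by simp [mdInsert_nil]
  | x :: xs => by
      rw [mdInsert_cons]
      by_cases hc : x.1 < e.1 ∨ (x.1 = e.1 ∧ x.2 < e.2)
      · rw [if_pos hc]
        exact ((mdInsert_perm e xs).cons x).trans (List.Perm.swap e x xs)
      · rw [if_neg hc]

theorem mdInsert_pairwise {e : Int × Nat} :
    ∀ {l : List (Int × Nat)}, l.Pairwise lexlt → (∀ x ∈ l, x ≠ e) →
      (mdInsert e l).Pairwise lexlt
  | [], _, _ => by simp [mdInsert_nil]
  | x :: xs, hp, hne => by
      rcases List.pairwise_cons.mp hp with ⟨hx, hxs⟩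
      rw [mdInsert_cons]
      by_cases hc : x.1 < e.1 ∨ (x.1 = e.1 ∧ x.2 < e.2)
      · rw [if_pos hc]
        refine List.pairwise_cons.mpr ⟨?_, mdInsert_pairwise hxs (fun y hy => hne y (List.mem_cons_of_mem _ hy))⟩
        intro y hy
        rcases mem_mdInsert hy with rfl | hy'
        · exact hc
        · exact hx y hy'
      · rw [if_neg hc]
        have hex : lexlt e x := lexlt_of_not (hne x List.mem_cons_self) hc
        refine List.pairwise_cons.mpr ⟨?_, hp⟩
        intro y hy
        rcases List.mem_cons.mp hy with rfl | hy'
        · exact hex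
        · exact lexlt_trans hex (hx y hy')

theorem zipIdx_set (cs : List Int) (k : Nat) (v : Int) :
    (cs.set k v).zipIdx = cs.zipIdx.set k (v, k) := by
  apply List.ext_getElem?
  intro i
  by_cases hik : i = k
  · subst hik
    by_cases hlt : i < cs.length
    · rw [List.getElem?_set_self (by simpa using hlt),
        List.getElem?_zipIdx, List.getElem?_set_self (by simpa [List.length_set] using hlt)]
      simp
    · have h1 : cs[i]? = none := List.getElem?_eq_none (by omega)
      have h2 : (cs.zipIdx.set i (v, i))[i]? = none :=
        List.getElem?_eq_none (by simp [List.length_zipIdx]; omega)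
      have h3 : (cs.set i v)[i]? = none := List.getElem?_eq_none (by simp; omega)
      rw [List.getElem?_zipIdx, h2, h3]
      simp
  · rw [List.getElem?_set_ne (Ne.symm hik) , List.getElem?_zipIdx, List.getElem?_zipIdx,
      List.getElem?_set_ne (Ne.symm hik)]

-- head of B's sorted worklist = (min value, A's argmin index); the core agreement fact
theorem step_agree (cs : List Int) (h : Int × Nat) (rest : List (Int × Nat)) (doce : Int)
    (hne : cs ≠ []) (hperm : (h :: rest).Perm cs.zipIdx)
    (hsort : (h :: rest).Pairwise lexlt) :
    (passoB (h :: rest) doce).Perm (passoA cs doce).zipIdx ∧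
      (passoB (h :: rest) doce).Pairwise lexlt := by
  have hmem : h ∈ cs.zipIdx := hperm.subset List.mem_cons_self
  have hhg : cs[h.2]? = some h.1 := List.mem_zipIdx_iff_getElem?.mp hmem
  obtain ⟨hk, hval⟩ := List.getElem?_eq_some_iff.mp hhg
  -- h.1 is a lower bound of cs
  have hmin : ∀ y ∈ cs, h.1 ≤ y := by
    intro y hy
    obtain ⟨j, hj, hyj⟩ := List.getElem_of_mem hy
    have hpair : (y, j) ∈ cs.zipIdx := by
      exact List.mem_zipIdx_iff_getElem?.mpr (by simpa using List.getElem?_eq_some_iff.mpr ⟨hj, hyj⟩)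
    rcases List.mem_cons.mp (hperm.mem_iff.mpr hpair) with heq | hrest
    · rw [← heq]
    · rcases List.rel_of_pairwise_cons hsort hrest with hlt | ⟨heq, -⟩
      · exact le_of_lt hlt
      · exact le_of_eq heq
  -- A's min(criancas) is h.1
  have hmq : PySem.List.min? cs (fun x => x) = some h.1 := by
    cases hmq : PySem.List.min? cs (fun x => x) with
    | none => exact absurd ((PySem.List.min?_eq_none_iff cs _).mp hmq) hne
    | some m =>
        have hm1 : m ∈ cs := PySem.List.min?_mem hmq
        have hm2 : m ≤ h.1 := PySem.List.min?_isMin hmq h.1 (hval ▸ List.getElem_mem hk)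
        have hm3 : h.1 ≤ m := hmin m hm1
        rw [le_antisymm hm2 hm3]
  -- A's criancas.index(min) is h.2
  have hidx : PySem.List.index? cs h.1 = some h.2 := by
    apply (PySem.List.index?_eq_some_iff cs h.1 h.2).mpr
    refine ⟨cs.take h.2, cs.drop (h.2 + 1), ?_, ?_, ?_⟩
    · conv_lhs => rw [← List.take_append_drop h.2 cs, ← List.getElem_cons_drop hk, hval]
    · simp [List.length_take]; omega
    · intro hmemtake
      obtain ⟨j, hj, hcj⟩ := List.mem_take_iff_getElem.mp hmemtake
      have hjk : j < h.2 := lt_of_lt_of_le hj (min_le_left _ _)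
      have hpair : (h.1, j) ∈ cs.zipIdx :=
        List.mem_zipIdx_iff_getElem?.mpr
          (by simpa using List.getElem?_eq_some_iff.mpr ⟨lt_of_lt_of_le hj (min_le_right _ _), hcj⟩)
      rcases List.mem_cons.mp (hperm.mem_iff.mpr hpair) with heq | hrest
      · have : h.2 = j := congrArg Prod.snd heq.symm
        omega
      · rcases List.rel_of_pairwise_cons hsort hrest with hlt | ⟨-, hlt⟩
        · exact absurd hlt (lt_irrefl h.1)
        · simp only at hlt; omega
  have hcmd : crianca_menos_doces cs = h.2 := by
    unfold crianca_menos_doces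
    rw [hmq]
    simp only [Option.getD_some]
    rw [hidx]
    rfl
  have hgetD : cs.getD h.2 0 = h.1 := by
    rw [List.getD_eq_getElem?_getD, List.getElem?_eq_getElem hk, hval]; rfl
  have hA : passoA cs doce = cs.set h.2 (h.1 + doce) := by
    simp only [passoA, hcmd, hgetD]
  have hB : passoB (h :: rest) doce = mdInsert (h.1 + doce, h.2) rest := rfl
  -- decompose cs.zipIdx around position h.2
  have hkz : h.2 < cs.zipIdx.length := by simpa [List.length_zipIdx] using hk
  have hZelem : cs.zipIdx[h.2] = h := by
    rw [List.getElem_zipIdx]; simp [hval]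
  have hZdecomp : cs.zipIdx = cs.zipIdx.take h.2 ++ h :: cs.zipIdx.drop (h.2 + 1) := by
    conv_lhs => rw [← List.take_append_drop h.2 cs.zipIdx, ← List.getElem_cons_drop hkz, hZelem]
  have hrestperm : rest.Perm (cs.zipIdx.take h.2 ++ cs.zipIdx.drop (h.2 + 1)) := by
    have hp2 := hperm
    rw [hZdecomp] at hp2
    exact (hp2.trans List.perm_middle).cons_inv
  have hzipset : (cs.set h.2 (h.1 + doce)).zipIdx =
      cs.zipIdx.take h.2 ++ (h.1 + doce, h.2) :: cs.zipIdx.drop (h.2 + 1) := by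
    rw [zipIdx_set, List.set_eq_take_append_cons_drop, if_pos hkz]
  constructor
  · rw [hA, hB, hzipset]
    exact ((mdInsert_perm _ rest).trans (hrestperm.cons _)).trans List.perm_middle.symm
  · rw [hB]
    refine mdInsert_pairwise (List.pairwise_cons.mp hsort).2 ?_
    intro x hx hxe
    have hx2 : x.2 = h.2 := by rw [hxe]
    have hxz : x ∈ cs.zipIdx := hperm.subset (List.mem_cons_of_mem _ hx)
    have hxg : cs[x.2]? = some x.1 := List.mem_zipIdx_iff_getElem?.mp hxz
    have hx1 : x.1 = h.1 := by rw [hx2] at hxg; rw [hhg] at hxg; exact (Option.some.inj hxg).symm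
    have hxh : x = h := Prod.ext hx1 hx2
    rcases List.rel_of_pairwise_cons hsort (hxh ▸ hx) with hlt | ⟨-, hlt⟩
    · exact absurd hlt (lt_irrefl h.1)
    · exact absurd hlt (lt_irrefl h.2)

theorem inv_fold (L : List Int) :
    ∀ (cs : List Int) (st : List (Int × Nat)), cs ≠ [] →
      st.Perm cs.zipIdx → st.Pairwise lexlt →
      (L.foldl passoB st).Perm ((L.foldl passoA cs).zipIdx) ∧
        (L.foldl passoB st).Pairwise lexlt ∧ (L.foldl passoA cs).length = cs.length := by
  induction L with
  | nil => intro cs st hne hperm hsort; exact ⟨hperm, hsort, rfl⟩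
  | cons d L ih =>
      intro cs st hne hperm hsort
      cases st with
      | nil =>
          exfalso
          have := hperm.length_eq
          simp [List.length_zipIdx] at this
          exact hne (List.eq_nil_of_length_eq_zero this.symm)
      | cons h rest =>
          obtain ⟨hp', hs'⟩ := step_agree cs h rest d hne hperm hsort
          have hlen : (passoA cs d).length = cs.length := by
            simp [passoA, List.length_set]
          have hne' : passoA cs d ≠ [] := by
            intro hnil; rw [hnil] at hlen; exact hne (List.eq_nil_of_length_eq_zero hlen.symm)
          obtain ⟨h1, h2, h3⟩ := ih (passoA cs d) (passoB (h :: rest) d) hne' hp' hs'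
          exact ⟨by simpa using h1, by simpa using h2, by simp [h3, hlen]⟩

theorem scatter (cs : List Int) :
    ∀ (L : List (Int × Nat)) (base : List Int), base.length = cs.length →
      (∀ p ∈ L, cs[p.2]? = some p.1) →
      (∀ k, k < cs.length → base[k]? = cs[k]? ∨ ∃ p ∈ L, p.2 = k) →
      L.foldl (fun ts e => ts.set e.2 e.1) base = cs := by
  intro L
  induction L with
  | nil =>
      intro base hlen _ h3
      simp only [List.foldl_nil]
      apply List.ext_getElem?
      intro i
      by_cases hi : i < cs.length
      · rcases h3 i hi with h | ⟨p, hp, _⟩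
        · exact h
        · simp at hp
      · rw [List.getElem?_eq_none (by omega), List.getElem?_eq_none (by omega)]
  | cons p L ih =>
      intro base hlen h2 h3
      have hp2 : p.2 < cs.length := by
        have h := h2 p List.mem_cons_self
        obtain ⟨hlt, -⟩ := List.getElem?_eq_some_iff.mp h
        exact hlt
      simp only [List.foldl_cons]
      apply ih
      · simp [List.length_set, hlen]
      · intro q hq; exact h2 q (List.mem_cons_of_mem _ hq)
      · intro k hk
        by_cases hkp : k = p.2
        · subst hkp
          left
          rw [List.getElem?_set_self (by omega)]
          exact (h2 p List.mem_cons_self).symm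
        · rcases h3 k hk with h | ⟨q, hq, hq2⟩
          · left; rw [List.getElem?_set_ne (by omega)]; exact h
          · rcases List.mem_cons.mp hq with rfl | hq'
            · exact absurd hq2.symm hkp
            · right; exact ⟨q, hq', hq2⟩

theorem init_zipIdx (n : Nat) :
    (List.replicate n (0 : Int)).zipIdx = (List.range n).map (fun i => ((0 : Int), i)) := by
  apply List.ext_getElem?
  intro i
  by_cases hi : i < n
  · rw [List.getElem?_zipIdx]
    simp [hi]
  · rw [List.getElem?_zipIdx]
    simp [hi]

theorem init_pairwise (n : Nat) :
    ((List.range n).map (fun i => ((0 : Int), i))).Pairwise lexlt := by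
  rw [List.pairwise_map]
  exact List.pairwise_lt_range.imp (fun h => Or.inr ⟨rfl, h⟩)

theorem arrGetD_toList (a : Array Int) (i : Nat) (d : Int) : a.getD i d = a.toList.getD i d := by
  rw [Array.getD_eq_getD_getElem?, List.getD_eq_getElem?_getD, Array.getElem?_toList]

theorem foldl_setIfInBounds (L : List (Int × Nat)) :
    ∀ (A : Array Int),
      (L.foldl (fun ts e => ts.setIfInBounds e.2 e.1) A).toList =
        L.foldl (fun ts e => ts.set e.2 e.1) A.toList := by
  induction L with
  | nil => intro A; rfl
  | cons p L ih =>
      intro A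
      simp only [List.foldl_cons]
      rw [ih, Array.toList_setIfInBounds]

-- ===== VERDICT (by name: the statement is the Claim_ definition above) =====
theorem menor_diferenca_spec : Claim_equal_menor_diferenca := by
  intro doces n hdom hpre
  unfold Spec_menor_diferenca
  have hN : 2 ≤ n.toNat := by
    unfold Pre_menor_diferenca at hpre; omega
  have hne : (List.replicate n.toNat (0 : Int)) ≠ [] := by
    simp only [ne_eq, List.replicate_eq_nil_iff]; omega
  have hinit_perm : ((List.range n.toNat).map (fun i => ((0 : Int), i))).Perm
      (List.replicate n.toNat (0 : Int)).zipIdx := by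
    rw [init_zipIdx]
  obtain ⟨hp, -, hlen⟩ :=
    inv_fold ((PySem.List.sorted doces (fun x => x) false).reverse)
      (List.replicate n.toNat (0 : Int))
      ((List.range n.toNat).map (fun i => ((0 : Int), i)))
      hne hinit_perm (init_pairwise n.toNat)
  have htot :
      (((PySem.List.sorted doces (fun x => x) false).reverse.foldl passoB
          ((List.range n.toNat).map (fun i => ((0 : Int), i)))).foldl
        (fun ts e => ts.setIfInBounds e.2 e.1)
        (Array.replicate n.toNat (0 : Int))).toList =
      (PySem.List.sorted doces (fun x => x) false).reverse.foldl passoA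
        (List.replicate n.toNat (0 : Int)) := by
    rw [foldl_setIfInBounds, Array.toList_replicate]
    apply scatter
    · simpa using hlen.symm
    · intro p hp'
      exact List.mem_zipIdx_iff_getElem?.mp (hp.subset hp')
    · intro k hk
      right
      refine ⟨(( (PySem.List.sorted doces (fun x => x) false).reverse.foldl passoA
        (List.replicate n.toNat (0 : Int)))[k]'hk, k), ?_, rfl⟩
      exact hp.mem_iff.mpr (List.mem_zipIdx_iff_getElem?.mpr (by simp))
  simp only [menor_diferenca, menor_diferenca_alt, arrGetD_toList, htot]
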